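-- pv_equiv track=rewrite | github.com/ishivvers/FlipperDBPagePublic | sndb.py | sql_format
-- ===== SOURCE A (Python) =====
-- def sql_format( messysql ):
--     """
--     Formats and simplifies SQL queries for easier reading.
--     """
--     try:
--         s = messysql.replace('WHERE','WHERE\n    ')
--         s = s.replace('LIMIT','\nLIMIT')
--         inparens = 0
--         i = 0
--         while True:
--             if i == len(s):
--                 break
--             if s[i] == '(':
--                 inparens +=1
--             elif s[i] == ')':
--                 inparens -=1
--             elif not inparens and s[i:i+3] == 'AND':
--                 s = s[:i]+'\n '+s[i:]
--                 i +=3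
--             i +=1
--     except:
--         raise SNDBError('ERROR: Your query does not seem to formed properly!')
--     return s
--
-- class SNDBError(Exception):
--     pass
-- ===== SOURCE B (Python) =====
-- def sql_format(messysql):
--     """
--     Formats and simplifies SQL queries for easier reading.
--     """
--     s = messysql.replace('WHERE', 'WHERE\n    ').replace('LIMIT', '\nLIMIT')
--     parts = s.split('AND')
--     pieces = [parts[0]]
--     depth = parts[0].count('(') - parts[0].count(')')
--     for frag in parts[1:]:
--         pieces.append('\n AND' if depth == 0 else 'AND')
--         pieces.append(frag)
--         depth += frag.count('(') - frag.count(')')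
--     return ''.join(pieces)
-- ===== Notes on version B (the rewrite author's own statement) =====
-- stated objective: faster
-- what changed: Replaces A's in-place index scan, which re-slices and regrows the whole string at every top-level separator it finds, with a single split on the separator followed by one fold over the fragments that re-inserts the separator (newline-prefixed when the running paren depth is zero) and joins the pieces once at the end.
import Mathlib
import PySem

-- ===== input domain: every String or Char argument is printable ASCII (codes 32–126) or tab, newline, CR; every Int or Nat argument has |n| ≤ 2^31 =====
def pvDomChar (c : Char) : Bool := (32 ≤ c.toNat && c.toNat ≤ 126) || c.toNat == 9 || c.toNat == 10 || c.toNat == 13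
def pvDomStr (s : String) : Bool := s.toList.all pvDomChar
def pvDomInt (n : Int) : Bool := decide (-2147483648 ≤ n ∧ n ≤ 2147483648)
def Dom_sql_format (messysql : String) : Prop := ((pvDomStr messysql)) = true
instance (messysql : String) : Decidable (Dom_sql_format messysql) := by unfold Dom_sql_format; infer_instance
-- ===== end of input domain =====

-- B rewrites A's in-place character scan (which re-slices and grows the string at each
-- top-level AND) as: split on 'AND', then one fold over the fragments that re-inserts
-- 'AND' or '\n AND' according to a running paren depth (objective: faster; split+join avoids the per-insertion string copies).

-- ===== PORT A =====
-- The while loop of A: state (s, inparens, i).  Python breaks when i == len(s); i never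
-- exceeds len(s) (each step moves past what it inserted), so the `≤` test used for
-- termination is exact on every reachable state.  s[i] is `getD` (i < len in that branch),
-- s[i:i+3] with i ≥ 0 is `(s.drop i).take 3`, s[:i] + '\n ' + s[i:] is take/drop — all exact
-- for a non-negative in-range index.
def sqlLoopA (s : List Char) (inparens : Int) (i : Nat) : List Char :=
  if h : s.length ≤ i then s
  else
    let c := s.getD i ' '
    if c = '(' then sqlLoopA s (inparens + 1) (i + 1)
    else if c = ')' then sqlLoopA s (inparens - 1) (i + 1)
    else if h2 : inparens = 0 ∧ (s.drop i).take 3 = ['A', 'N', 'D'] then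
      sqlLoopA (s.take i ++ '\n' :: ' ' :: s.drop i) inparens (i + 3 + 1)
    else sqlLoopA s inparens (i + 1)
termination_by s.length - i
decreasing_by
  · omega
  · omega
  · have h3 : ((s.drop i).take 3).length = 3 := by rw [h2.2]; rfl
    simp only [List.length_take, List.length_drop] at h3
    simp only [List.length_append, List.length_take, List.length_cons, List.length_drop]
    omega
  · omega

-- The two replaces never raise; the try/except of A is dead code and is not ported.
def sql_format (messysql : String) : String :=
  let s := PySem.Chars.replace messysql.toList
      ['W', 'H', 'E', 'R', 'E'] ['W', 'H', 'E', 'R', 'E', '\n', ' ', ' ', ' ', ' ']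
  let s2 := PySem.Chars.replace s ['L', 'I', 'M', 'I', 'T'] ['\n', 'L', 'I', 'M', 'I', 'T']
  String.ofList (sqlLoopA s2 0 0)

-- ===== PORT B =====
-- s.split('AND'): structural port of Python's str.split for this non-empty separator
-- (left-to-right, non-overlapping matches; always returns a non-empty list) — exact.
def splitAND : List Char → List (List Char)
  | [] => [[]]
  | c :: cs =>
    if ['A', 'N', 'D'].isPrefixOf (c :: cs) then [] :: splitAND ((c :: cs).drop 3)
    else
      match splitAND cs with
      | [] => [[c]]          -- unreachable: splitAND never returns []
      | h :: t => (c :: h) :: t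
termination_by l => l.length
decreasing_by
  · simp only [List.drop_succ_cons, List.length_cons, List.length_drop]; omega
  · simp

-- frag.count('(') - frag.count(')'): a one-character str.count is the character count — exact.
def netB (p : List Char) : Int := (p.count '(' : Int) - (p.count ')' : Int)

def sql_format_alt (messysql : String) : String :=
  let s := PySem.Chars.replace messysql.toList
      ['W', 'H', 'E', 'R', 'E'] ['W', 'H', 'E', 'R', 'E', '\n', ' ', ' ', ' ', ' ']
  let s2 := PySem.Chars.replace s ['L', 'I', 'M', 'I', 'T'] ['\n', 'L', 'I', 'M', 'I', 'T']
  match splitAND s2 with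
  | [] => ""               -- unreachable: splitAND never returns []
  | p0 :: rest =>
    -- the loop: pieces list + running depth; ''.join(pieces) is flatten
    let out := rest.foldl
      (fun (acc : List (List Char) × Int) frag =>
        (acc.1 ++ [if acc.2 = 0 then ['\n', ' ', 'A', 'N', 'D'] else ['A', 'N', 'D'], frag],
         acc.2 + netB frag))
      ([p0], netB p0)
    String.ofList out.1.flatten

-- ===== PRECONDITION & SPEC =====
def Spec_sql_format (messysql : String) (out : String) : Prop := out = sql_format_alt messysql
instance (messysql : String) (out : String) : Decidable (Spec_sql_format messysql out) := by unfold Spec_sql_format; infer_instance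

-- ===== CLAIM (what is proved, stated in full; the proofs are below) =====
def Claim_equal_sql_format : Prop := ∀ (messysql : String), Dom_sql_format messysql → Spec_sql_format messysql (sql_format messysql)

-- ===== LEMMAS AND PROOFS =====

-- Structural model of A's loop: the output for the still-unscanned suffix at depth d.
def procA : List Char → Int → List Char
  | [], _ => []
  | c :: cs, d =>
    if c = '(' then c :: procA cs (d + 1)
    else if c = ')' then c :: procA cs (d - 1)
    else if d = 0 ∧ (c :: cs).take 3 = ['A', 'N', 'D'] then
      '\n' :: ' ' :: 'A' :: 'N' :: procA (cs.drop 1) d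
    else c :: procA cs d
termination_by l => l.length
decreasing_by
  · simp
  · simp
  · simp only [List.length_cons, List.length_drop]; omega
  · simp

lemma take_three_shape {c : Char} {cs : List Char}
    (htk : (c :: cs).take 3 = ['A', 'N', 'D']) :
    c = 'A' ∧ ∃ rest, cs = 'N' :: 'D' :: rest := by
  have hs : ('A' : Char) :: 'N' :: 'D' :: ((c :: cs).drop 3) = c :: cs := by
    conv_rhs => rw [← List.take_append_drop 3 (c :: cs)]
    rw [htk]; rfl
  refine ⟨?_, (c :: cs).drop 3, ?_⟩
  · injection hs with h1 _; exact h1.symm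
  · injection hs with _ h2; exact h2.symm

lemma sqlLoopA_eq_procA (n : Nat) :
    ∀ (r pre : List Char) (d : Int), r.length ≤ n →
      sqlLoopA (pre ++ r) d pre.length = pre ++ procA r d := by
  induction n with
  | zero =>
    intro r pre d hn
    have : r = [] := List.length_eq_zero_iff.mp (Nat.le_zero.mp hn)
    subst this
    rw [sqlLoopA, procA]
    simp
  | succ n ih =>
    intro r pre d hn
    match r with
    | [] => rw [sqlLoopA, procA]; simp
    | c :: cs =>
      rw [sqlLoopA, procA]
      have hlen : ¬ (pre ++ c :: cs).length ≤ pre.length := by simp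
      rw [dif_neg hlen]
      have hget : (pre ++ c :: cs).getD pre.length ' ' = c := by
        simp [List.getD_eq_getElem?_getD]
      have hdrop : (pre ++ c :: cs).drop pre.length = c :: cs := by simp
      have htake : (pre ++ c :: cs).take pre.length = pre := by simp
      simp only [hget, hdrop, htake]
      have hn' : cs.length ≤ n := by simp only [List.length_cons] at hn; omega
      by_cases hc1 : c = '('
      · rw [if_pos hc1, if_pos hc1]
        have := ih cs (pre ++ [c]) (d + 1) hn'
        simpa using this
      · rw [if_neg hc1, if_neg hc1]
        by_cases hc2 : c = ')'
        · rw [if_pos hc2, if_pos hc2]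
          have := ih cs (pre ++ [c]) (d - 1) hn'
          simpa using this
        · rw [if_neg hc2, if_neg hc2]
          by_cases h3 : d = 0 ∧ (c :: cs).take 3 = ['A', 'N', 'D']
          · rw [dif_pos h3, if_pos h3]
            obtain ⟨hc, rest, hcs⟩ := take_three_shape h3.2
            subst hc; subst hcs
            have hrn : ('D' :: rest).length ≤ n := by
              simp only [List.length_cons] at hn ⊢; omega
            have := ih ('D' :: rest) (pre ++ ['\n', ' ', 'A', 'N']) d hrn
            simp only [List.append_assoc] at this ⊢
            simpa using this
          · rw [dif_neg h3, if_neg h3]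
            have := ih cs (pre ++ [c]) d hn'
            simpa using this

-- B's glue, written as a recursion for the proof.
def glueB : Int → List (List Char) → List Char
  | _, [] => []
  | d, p :: ps =>
    (if d = 0 then ['\n', ' ', 'A', 'N', 'D'] else ['A', 'N', 'D']) ++ p ++ glueB (d + netB p) ps

lemma foldl_eq_glueB (rest : List (List Char)) :
    ∀ (acc : List (List Char)) (d : Int),
      (rest.foldl
        (fun (a : List (List Char) × Int) frag =>
          (a.1 ++ [if a.2 = 0 then ['\n', ' ', 'A', 'N', 'D'] else ['A', 'N', 'D'], frag],
           a.2 + netB frag))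
        (acc, d)).1.flatten = acc.flatten ++ glueB d rest := by
  induction rest with
  | nil => intro acc d; simp [glueB]
  | cons frag rest ih =>
    intro acc d
    simp only [List.foldl_cons]
    rw [ih]
    simp [glueB]

lemma splitAND_ne_nil (l : List Char) : splitAND l ≠ [] := by
  match l with
  | [] => rw [splitAND]; simp
  | c :: cs =>
    rw [splitAND]
    by_cases h : ['A', 'N', 'D'].isPrefixOf (c :: cs)
    · rw [if_pos h]; simp
    · rw [if_neg h]
      match hsp : splitAND cs with
      | [] => simp
      | h' :: t' => simp

lemma splitAND_cons_ex (l : List Char) : ∃ p t, splitAND l = p :: t := by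
  match hx : splitAND l with
  | [] => exact absurd hx (splitAND_ne_nil l)
  | a :: b => exact ⟨a, b, rfl⟩

lemma netB_cons (c : Char) (p : List Char) :
    netB (c :: p) = ((if c = '(' then 1 else 0) - (if c = ')' then 1 else 0) : Int) + netB p := by
  simp only [netB, List.count_cons]
  by_cases h1 : c = '('
  · subst h1; simp; ring
  · by_cases h2 : c = ')'
    · subst h2; simp; ring
    · simp [(by simp [h1] : (c == '(') = false), (by simp [h2] : (c == ')') = false), h1, h2]

lemma procA_eq_glueB (n : Nat) :
    ∀ (r : List Char) (d : Int) (p : List Char) (t : List (List Char)),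
      r.length ≤ n → splitAND r = p :: t →
      procA r d = p ++ glueB (d + netB p) t := by
  induction n with
  | zero =>
    intro r d p t hn hsp
    have : r = [] := List.length_eq_zero_iff.mp (Nat.le_zero.mp hn)
    subst this
    rw [splitAND] at hsp
    obtain ⟨rfl, rfl⟩ : p = [] ∧ t = [] := by
      constructor <;> [injection hsp with e1 _; injection hsp with _ e2] <;> simp_all
    rw [procA]; simp [glueB]
  | succ n ih =>
    intro r d p t hn hsp
    match r with
    | [] =>
      rw [splitAND] at hsp
      obtain ⟨rfl, rfl⟩ : p = [] ∧ t = [] := by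
        constructor <;> [injection hsp with e1 _; injection hsp with _ e2] <;> simp_all
      rw [procA]; simp [glueB]
    | c :: cs =>
      rw [splitAND] at hsp
      by_cases hpre : ['A', 'N', 'D'].isPrefixOf (c :: cs)
      · rw [if_pos hpre] at hsp
        -- r begins with AND: c = 'A', cs = 'N' :: 'D' :: rest
        have htk3 : (c :: cs).take 3 = ['A', 'N', 'D'] := by
          obtain ⟨rest, hrest⟩ := List.isPrefixOf_iff_prefix.mp hpre
          rw [← hrest]; rfl
        obtain ⟨hc, rest, hcs⟩ := take_three_shape htk3
        subst hc; subst hcs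
        have hdrop3 : (('A' : Char) :: 'N' :: 'D' :: rest).drop 3 = rest := rfl
        rw [hdrop3] at hsp
        have hp : p = [] := by injection hsp with e1 _; exact e1.symm
        have ht : splitAND rest = t := by injection hsp
        obtain ⟨p', t', hsp'⟩ := splitAND_cons_ex rest
        have iht : procA rest d = p' ++ glueB (d + netB p') t' :=
          ih rest d p' t' (by simp only [List.length_cons] at hn; omega) hsp'
        subst hp
        rw [ht] at hsp'
        subst hsp'
        by_cases hd : d = 0
        · subst hd
          rw [procA, if_neg (by decide), if_neg (by decide), if_pos ⟨rfl, rfl⟩]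
          have h1 : (('N' : Char) :: 'D' :: rest).drop 1 = 'D' :: rest := rfl
          rw [h1, procA, if_neg (by decide), if_neg (by decide), if_neg (by simp)]
          rw [iht]
          simp [glueB, netB]
        · rw [procA, if_neg (by decide), if_neg (by decide), if_neg (by simp [hd])]
          rw [procA, if_neg (by decide), if_neg (by decide), if_neg (by simp)]
          rw [procA, if_neg (by decide), if_neg (by decide), if_neg (by simp)]
          rw [iht]
          simp [glueB, hd, netB]
      · rw [if_neg hpre] at hsp
        obtain ⟨p', t', hsp'⟩ := splitAND_cons_ex cs
        rw [hsp'] at hsp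
        have hp : p = c :: p' := by injection hsp with e1 _; exact e1.symm
        have ht : t = t' := by injection hsp with _ e2; exact e2.symm
        subst hp
        rw [ht]
        have hnotAND : ¬ (c :: cs).take 3 = ['A', 'N', 'D'] := by
          intro hcontra
          exact hpre (List.isPrefixOf_iff_prefix.mpr
            ⟨(c :: cs).drop 3, by rw [← hcontra]; simp⟩)
        have hn' : cs.length ≤ n := by simp only [List.length_cons] at hn; omega
        rw [procA]
        by_cases hc1 : c = '('
        · rw [if_pos hc1, ih cs (d + 1) p' t' hn' hsp', netB_cons]
          simp [hc1]
          ring_nf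
        · rw [if_neg hc1]
          by_cases hc2 : c = ')'
          · rw [if_pos hc2, ih cs (d - 1) p' t' hn' hsp', netB_cons]
            simp [hc2]
            ring_nf
          · rw [if_neg hc2, if_neg (by intro hc; exact hnotAND hc.2)]
            rw [ih cs d p' t' hn' hsp', netB_cons]
            simp [hc1, hc2]

-- The two ports after their (identical) replace preprocessing.
lemma core_eq (s2 : List Char) :
    String.ofList (sqlLoopA s2 0 0) =
      (match splitAND s2 with
        | [] => ""
        | p0 :: rest =>
          String.ofList ((rest.foldl
            (fun (a : List (List Char) × Int) frag =>
              (a.1 ++ [if a.2 = 0 then ['\n', ' ', 'A', 'N', 'D'] else ['A', 'N', 'D'], frag],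
               a.2 + netB frag))
            ([p0], netB p0)).1.flatten)) := by
  obtain ⟨p0, rest, hsp⟩ := splitAND_cons_ex s2
  rw [hsp]
  dsimp only
  have hA : sqlLoopA s2 0 0 = procA s2 0 := by
    have := sqlLoopA_eq_procA s2.length s2 [] 0 (Nat.le_refl _)
    simpa using this
  rw [hA, procA_eq_glueB s2.length s2 0 p0 rest (Nat.le_refl _) hsp,
    foldl_eq_glueB rest [p0] (netB p0)]
  simp

-- ===== VERDICT (by name: the statement is the Claim_ definition above) =====
theorem sql_format_spec : Claim_equal_sql_format := by
  intro messysql _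
  unfold Spec_sql_format sql_format sql_format_alt
  dsimp only
  exact core_eq _
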